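-- pv_equiv track=rewrite | github.com/Zenith918/project-trinity | server/adapters/mouth_adapter.py | _process_action_tags
-- ===== SOURCE A (Python) =====
-- def _process_action_tags(text: str) -> str:
--     """
--     处理动作标签，转换为 CosyVoice 支持的格式
--
--     例如: [laugh] -> <laugh>
--     """
--     action_mapping = {
--         "[laugh]": "<laughter>",
--         "[sigh]": "<sigh>",
--         "[smile]": "",  # 微笑不影响语音
--         "[pause]": "...",
--     }
--
--     for tag, replacement in action_mapping.items():
--         text = text.replace(tag, replacement)
--
--     return text
-- ===== SOURCE B (Python) =====
-- def _process_action_tags(text: str) -> str: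
--     """Single left-to-right scan dispatching on the tag found at each position
--     (instead of four sequential full-string replace passes)."""
--     out = []
--     i = 0
--     n = len(text)
--     while i < n:
--         if text.startswith("[laugh]", i):
--             out.append("<laughter>")
--             i += 7
--         elif text.startswith("[sigh]", i):
--             out.append("<sigh>")
--             i += 6
--         elif text.startswith("[smile]", i):
--             i += 7  # smile does not affect the voice
--         elif text.startswith("[pause]", i):
--             out.append("...")
--             i += 7
--         else:
--             out.append(text[i])
--             i += 1
--     return "".join(out)
-- ===== Notes on version B (the rewrite author's own statement) =====
-- stated objective: alternative
-- what changed: B replaces A's four sequential full-string replace passes by one left-to-right scan that dispatches on whichever tag starts at the current position and copies other characters through.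
-- outside the precondition, e.g. on _process_action_tags('[[smile]pause]'): A returns '...', B returns '[pause]'
import Mathlib
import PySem

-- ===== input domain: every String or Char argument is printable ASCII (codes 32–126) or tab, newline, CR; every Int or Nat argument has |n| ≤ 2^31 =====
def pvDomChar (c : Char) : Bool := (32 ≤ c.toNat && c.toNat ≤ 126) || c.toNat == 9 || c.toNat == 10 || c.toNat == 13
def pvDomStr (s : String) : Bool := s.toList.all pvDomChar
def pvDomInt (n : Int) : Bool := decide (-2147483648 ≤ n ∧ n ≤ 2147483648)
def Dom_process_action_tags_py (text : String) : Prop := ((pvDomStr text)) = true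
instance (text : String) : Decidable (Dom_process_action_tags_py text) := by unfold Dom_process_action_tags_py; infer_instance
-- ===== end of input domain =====

set_option maxRecDepth 8192


-- B replaces A's four sequential full-string replace passes by one left-to-right scan
-- dispatching on the tag found at each position (alternative decomposition, not claimed faster).

-- ===== PORT A =====
def pvActionMapping : List (String × String) :=
  [("[laugh]", "<laughter>"), ("[sigh]", "<sigh>"), ("[smile]", ""), ("[pause]", "...")]

def process_action_tags_py (text : String) : String :=
  pvActionMapping.foldl (fun t p => PySem.Str.replace t p.1 p.2) text

-- ===== PORT B =====
-- single left-to-right scan; at each position dispatch on whichever tag starts there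
def pvScanB : List Char → List Char
  | [] => []
  | c :: t =>
    if "[laugh]".toList.isPrefixOf (c :: t) then "<laughter>".toList ++ pvScanB (t.drop 6)
    else if "[sigh]".toList.isPrefixOf (c :: t) then "<sigh>".toList ++ pvScanB (t.drop 5)
    else if "[smile]".toList.isPrefixOf (c :: t) then pvScanB (t.drop 6)
    else if "[pause]".toList.isPrefixOf (c :: t) then "...".toList ++ pvScanB (t.drop 6)
    else c :: pvScanB t
termination_by l => l.length
decreasing_by all_goals (simp [List.length_drop]; try omega)

def process_action_tags_py_alt (text : String) : String :=
  String.ofList (pvScanB text.toList)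

-- ===== PRECONDITION & SPEC =====
-- Pre_ excludes texts in which deleting "[smile]" (whose replacement is empty) glues the
-- surrounding characters into a new "[pause]" occurrence: there A's sequential replaces cascade
-- (the later "[pause]" pass rewrites the glued tag) while B's single pass over the original text
-- does not; both behaviours are defensible on this unspecified corner.
def Pre_process_action_tags_py (text : String) : Prop :=
  ∀ s ∈ text.toList.tails,
    "[pause]".toList <+: PySem.Chars.replace s "[smile]".toList [] →
      ("[pause]".toList <+: s ∨ "[smile]".toList <+: s)
instance (text : String) : Decidable (Pre_process_action_tags_py text) := by
  unfold Pre_process_action_tags_py; infer_instance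

def pvWitness_process_action_tags_py : String := "ok [laugh]"

def Spec_process_action_tags_py (text : String) (out : String) : Prop := out = process_action_tags_py_alt text
instance (text : String) (out : String) : Decidable (Spec_process_action_tags_py text out) := by unfold Spec_process_action_tags_py; infer_instance

-- ===== CLAIM (what is proved, stated in full; the proofs are below) =====
def Claim_equal_process_action_tags_py : Prop := ∀ (text : String), Dom_process_action_tags_py text → Pre_process_action_tags_py text → Spec_process_action_tags_py text (process_action_tags_py text)

-- ===== LEMMAS AND PROOFS =====

-- structural model of Python's str.replace for a nonempty pattern (o :: os), replacement nw
def pvRep (o : Char) (os nw : List Char) : List Char → List Char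
  | [] => []
  | c :: t =>
    if (o :: os) <+: (c :: t) then nw ++ pvRep o os nw (t.drop os.length)
    else c :: pvRep o os nw t
termination_by l => l.length
decreasing_by all_goals (simp [List.length_drop]; try omega)

-- the four tags (tails) and replacements as explicit character lists
def pvOs1 : List Char := ['l','a','u','g','h',']']
def pvOs2 : List Char := ['s','i','g','h',']']
def pvOs3 : List Char := ['s','m','i','l','e',']']
def pvOs4 : List Char := ['p','a','u','s','e',']']
def pvN1 : List Char := ['<','l','a','u','g','h','t','e','r','>']
def pvN2 : List Char := ['<','s','i','g','h','>']
def pvN4 : List Char := ['.','.','.']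

def pvR1 (l : List Char) : List Char := pvRep '[' pvOs1 pvN1 l
def pvR2 (l : List Char) : List Char := pvRep '[' pvOs2 pvN2 l
def pvR3 (l : List Char) : List Char := pvRep '[' pvOs3 [] l
def pvR4 (l : List Char) : List Char := pvRep '[' pvOs4 pvN4 l

theorem pvRep_nil (o : Char) (os nw : List Char) : pvRep o os nw [] = [] := by
  simp [pvRep]

theorem pvRep_cons_pos (o : Char) (os nw : List Char) (c : Char) (t : List Char)
    (h : (o :: os) <+: (c :: t)) :
    pvRep o os nw (c :: t) = nw ++ pvRep o os nw (t.drop os.length) := by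
  rw [pvRep, if_pos h]

theorem pvRep_cons_neg (o : Char) (os nw : List Char) (c : Char) (t : List Char)
    (h : ¬ (o :: os) <+: (c :: t)) :
    pvRep o os nw (c :: t) = c :: pvRep o os nw t := by
  rw [pvRep, if_neg h]

theorem pvRep_append_self (o : Char) (os nw r : List Char) :
    pvRep o os nw ((o :: os) ++ r) = nw ++ pvRep o os nw r := by
  have h : (o :: os) <+: (o :: (os ++ r)) := ⟨r, by simp⟩
  rw [List.cons_append, pvRep_cons_pos o os nw o (os ++ r) h, List.drop_left]

theorem pvRep_pass (o : Char) (os nw : List Char) (a r : List Char)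
    (h : ∀ ch ∈ a, ch ≠ o) :
    pvRep o os nw (a ++ r) = a ++ pvRep o os nw r := by
  induction a with
  | nil => simp
  | cons x a ih =>
    have hx : x ≠ o := h x (by simp)
    have hnp : ¬ (o :: os) <+: x :: (a ++ r) := by
      intro hp
      rcases List.cons_prefix_cons.mp hp with ⟨rfl, -⟩
      exact hx rfl
    rw [List.cons_append, pvRep_cons_neg o os nw x (a ++ r) hnp,
        ih (fun ch hch => h ch (by simp [hch]))]
    simp

theorem pvPrefix_take {p a r : List Char} (h : p <+: a ++ r) : p.take a.length <+: a := by
  obtain ⟨t, ht⟩ := h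
  have h2 := congrArg (List.take a.length) ht
  rw [List.take_append, List.take_left] at h2
  exact ⟨_, h2⟩

theorem pvNotPrefix {p a : List Char} (r : List Char) (h : ¬ p.take a.length <+: a) :
    ¬ p <+: a ++ r := fun hp => h (pvPrefix_take hp)

theorem pvRep_peel (o : Char) (os nw : List Char) (x : Char) (a r : List Char)
    (h : ¬ (o :: os) <+: x :: (a ++ r)) (ha : ∀ ch ∈ a, ch ≠ o) :
    pvRep o os nw (x :: (a ++ r)) = x :: (a ++ pvRep o os nw r) := by
  rw [pvRep_cons_neg o os nw x (a ++ r) h, pvRep_pass o os nw a r ha]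


theorem pvIsPrefixOf_true {p l : List Char} (h : p <+: l) : p.isPrefixOf l = true :=
  List.isPrefixOf_iff_prefix.mpr h

theorem pvIsPrefixOf_false {p l : List Char} (h : ¬ p <+: l) : ¬ (p.isPrefixOf l = true) :=
  fun hb => h (List.isPrefixOf_iff_prefix.mp hb)

-- a replacement starting with n0 never creates a new occurrence of a pattern avoiding n0
theorem pvNoCreate (o : Char) (os : List Char) (n0 : Char) (ntl : List Char) :
    ∀ n u p, u.length ≤ n → n0 ∉ p → p <+: pvRep o os (n0 :: ntl) u → p <+: u := by
  intro n
  induction n with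
  | zero =>
    intro u p hu hn hp
    have hu0 : u = [] := List.eq_nil_of_length_eq_zero (Nat.le_zero.mp hu)
    subst hu0
    rw [pvRep_nil] at hp
    rw [List.prefix_nil.mp hp]
  | succ n ih =>
    intro u p hu hn hp
    cases u with
    | nil =>
      rw [pvRep_nil] at hp
      rw [List.prefix_nil.mp hp]
    | cons c t =>
      by_cases h : (o :: os) <+: (c :: t)
      · rw [pvRep_cons_pos _ _ _ _ _ h, List.cons_append] at hp
        cases p with
        | nil => exact List.nil_prefix
        | cons ph pt =>
          have h1 := (List.cons_prefix_cons.mp hp).1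
          subst h1
          exact absurd List.mem_cons_self hn
      · rw [pvRep_cons_neg _ _ _ _ _ h] at hp
        cases p with
        | nil => exact List.nil_prefix
        | cons ph pt =>
          obtain ⟨h1, hpt⟩ := List.cons_prefix_cons.mp hp
          subst h1
          have hrec : pt <+: t :=
            ih t pt (by simpa using hu) (fun hm => hn (List.mem_cons_of_mem _ hm)) hpt
          exact List.cons_prefix_cons.mpr ⟨rfl, hrec⟩


-- specialised rewriting lemmas for the four passes
theorem pvR1_yes (r : List Char) : pvR1 (('[' :: pvOs1) ++ r) = pvN1 ++ pvR1 r := by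
  simp only [pvR1]; exact pvRep_append_self '[' pvOs1 pvN1 r

theorem pvR2_yes (r : List Char) : pvR2 (('[' :: pvOs2) ++ r) = pvN2 ++ pvR2 r := by
  simp only [pvR2]; exact pvRep_append_self '[' pvOs2 pvN2 r

theorem pvR3_yes (r : List Char) : pvR3 (('[' :: pvOs3) ++ r) = pvR3 r := by
  simp only [pvR3]
  have := pvRep_append_self '[' pvOs3 [] r
  simpa using this

theorem pvR4_yes (r : List Char) : pvR4 (('[' :: pvOs4) ++ r) = pvN4 ++ pvR4 r := by
  simp only [pvR4]; exact pvRep_append_self '[' pvOs4 pvN4 r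

theorem pvR2_passN1 (X : List Char) : pvR2 (pvN1 ++ X) = pvN1 ++ pvR2 X := by
  simp only [pvR2]; exact pvRep_pass '[' pvOs2 pvN2 pvN1 X (by simp [pvN1])

theorem pvR3_passN1 (X : List Char) : pvR3 (pvN1 ++ X) = pvN1 ++ pvR3 X := by
  simp only [pvR3]; exact pvRep_pass '[' pvOs3 [] pvN1 X (by simp [pvN1])

theorem pvR4_passN1 (X : List Char) : pvR4 (pvN1 ++ X) = pvN1 ++ pvR4 X := by
  simp only [pvR4]; exact pvRep_pass '[' pvOs4 pvN4 pvN1 X (by simp [pvN1])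

theorem pvR3_passN2 (X : List Char) : pvR3 (pvN2 ++ X) = pvN2 ++ pvR3 X := by
  simp only [pvR3]; exact pvRep_pass '[' pvOs3 [] pvN2 X (by simp [pvN2])

theorem pvR4_passN2 (X : List Char) : pvR4 (pvN2 ++ X) = pvN2 ++ pvR4 X := by
  simp only [pvR4]; exact pvRep_pass '[' pvOs4 pvN4 pvN2 X (by simp [pvN2])

theorem pvR1_blockT2 (X : List Char) : pvR1 (('[' :: pvOs2) ++ X) = ('[' :: pvOs2) ++ pvR1 X := by
  simp only [pvR1]
  rw [show ('[' :: pvOs2) ++ X = '[' :: (pvOs2 ++ X) from rfl,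
      pvRep_peel '[' pvOs1 pvN1 '[' pvOs2 X (pvNotPrefix (p := '[' :: pvOs1) (a := '[' :: pvOs2) X (by decide)) (by simp [pvOs2])]
  rfl

theorem pvR1_blockT3 (X : List Char) : pvR1 (('[' :: pvOs3) ++ X) = ('[' :: pvOs3) ++ pvR1 X := by
  simp only [pvR1]
  rw [show ('[' :: pvOs3) ++ X = '[' :: (pvOs3 ++ X) from rfl,
      pvRep_peel '[' pvOs1 pvN1 '[' pvOs3 X (pvNotPrefix (p := '[' :: pvOs1) (a := '[' :: pvOs3) X (by decide)) (by simp [pvOs3])]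
  rfl

theorem pvR1_blockT4 (X : List Char) : pvR1 (('[' :: pvOs4) ++ X) = ('[' :: pvOs4) ++ pvR1 X := by
  simp only [pvR1]
  rw [show ('[' :: pvOs4) ++ X = '[' :: (pvOs4 ++ X) from rfl,
      pvRep_peel '[' pvOs1 pvN1 '[' pvOs4 X (pvNotPrefix (p := '[' :: pvOs1) (a := '[' :: pvOs4) X (by decide)) (by simp [pvOs4])]
  rfl

theorem pvR2_blockT3 (X : List Char) : pvR2 (('[' :: pvOs3) ++ X) = ('[' :: pvOs3) ++ pvR2 X := by
  simp only [pvR2]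
  rw [show ('[' :: pvOs3) ++ X = '[' :: (pvOs3 ++ X) from rfl,
      pvRep_peel '[' pvOs2 pvN2 '[' pvOs3 X (pvNotPrefix (p := '[' :: pvOs2) (a := '[' :: pvOs3) X (by decide)) (by simp [pvOs3])]
  rfl

theorem pvR2_blockT4 (X : List Char) : pvR2 (('[' :: pvOs4) ++ X) = ('[' :: pvOs4) ++ pvR2 X := by
  simp only [pvR2]
  rw [show ('[' :: pvOs4) ++ X = '[' :: (pvOs4 ++ X) from rfl,
      pvRep_peel '[' pvOs2 pvN2 '[' pvOs4 X (pvNotPrefix (p := '[' :: pvOs2) (a := '[' :: pvOs4) X (by decide)) (by simp [pvOs4])]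
  rfl

theorem pvR3_blockT4 (X : List Char) : pvR3 (('[' :: pvOs4) ++ X) = ('[' :: pvOs4) ++ pvR3 X := by
  simp only [pvR3]
  rw [show ('[' :: pvOs4) ++ X = '[' :: (pvOs4 ++ X) from rfl,
      pvRep_peel '[' pvOs3 [] '[' pvOs4 X (pvNotPrefix (p := '[' :: pvOs3) (a := '[' :: pvOs4) X (by decide)) (by simp [pvOs4])]
  rfl

theorem pvR1_cons {c : Char} {t : List Char} (h : ¬ ('[' :: pvOs1) <+: (c :: t)) :
    pvR1 (c :: t) = c :: pvR1 t := pvRep_cons_neg _ _ _ _ _ h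

theorem pvR2_cons {c : Char} {t : List Char} (h : ¬ ('[' :: pvOs2) <+: (c :: t)) :
    pvR2 (c :: t) = c :: pvR2 t := pvRep_cons_neg _ _ _ _ _ h

theorem pvR3_cons {c : Char} {t : List Char} (h : ¬ ('[' :: pvOs3) <+: (c :: t)) :
    pvR3 (c :: t) = c :: pvR3 t := pvRep_cons_neg _ _ _ _ _ h

theorem pvR4_cons {c : Char} {t : List Char} (h : ¬ ('[' :: pvOs4) <+: (c :: t)) :
    pvR4 (c :: t) = c :: pvR4 t := pvRep_cons_neg _ _ _ _ _ h

-- pass 1 / pass 2 never create a prefix occurrence of a '<'-free pattern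
theorem pvNC1 {t p : List Char} (hn : ('<' : Char) ∉ p) (h : p <+: pvR1 t) : p <+: t := by
  apply pvNoCreate '[' pvOs1 '<' ['l','a','u','g','h','t','e','r','>'] t.length t p (le_refl _) hn
  simpa only [pvR1, pvN1] using h

theorem pvNC2 {t p : List Char} (hn : ('<' : Char) ∉ p) (h : p <+: pvR2 t) : p <+: t := by
  apply pvNoCreate '[' pvOs2 '<' ['s','i','g','h','>'] t.length t p (le_refl _) hn
  simpa only [pvR2, pvN2] using h

-- the first three passes create a prefix occurrence of a '<'-free '['-free pattern only where
-- deleting "[smile]" alone creates it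
theorem pvKey :
    ∀ n u p, u.length ≤ n → ('<' : Char) ∉ p → ('[' : Char) ∉ p →
      p <+: pvR3 (pvR2 (pvR1 u)) → p <+: pvR3 u := by
  intro n
  induction n with
  | zero =>
    intro u p hu _ _ hp
    have hu0 : u = [] := List.eq_nil_of_length_eq_zero (Nat.le_zero.mp hu)
    subst hu0
    simp only [pvR1, pvR2, pvR3, pvRep_nil] at hp ⊢
    exact hp
  | succ n ih =>
    intro u p hu hlt hlb hp
    cases u with
    | nil =>
      simp only [pvR1, pvR2, pvR3, pvRep_nil] at hp ⊢
      exact hp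
    | cons c t =>
      have hu' : t.length ≤ n := by
        have : t.length + 1 ≤ n + 1 := by simpa using hu
        omega
      by_cases g1 : ('[' :: pvOs1) <+: (c :: t)
      · obtain ⟨r, hr⟩ := g1
        rw [← hr, pvR1_yes, pvR2_passN1, pvR3_passN1] at hp
        cases p with
        | nil => exact List.nil_prefix
        | cons ph pt =>
          rw [show (pvN1 : List Char) ++ pvR3 (pvR2 (pvR1 r)) =
                '<' :: (['l','a','u','g','h','t','e','r','>'] ++ pvR3 (pvR2 (pvR1 r))) from rfl] at hp
          have h1 := (List.cons_prefix_cons.mp hp).1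
          subst h1
          exact absurd List.mem_cons_self hlt
      · by_cases g2 : ('[' :: pvOs2) <+: (c :: t)
        · obtain ⟨r, hr⟩ := g2
          rw [← hr, pvR1_blockT2, pvR2_yes, pvR3_passN2] at hp
          cases p with
          | nil => exact List.nil_prefix
          | cons ph pt =>
            rw [show (pvN2 : List Char) ++ pvR3 (pvR2 (pvR1 r)) =
                  '<' :: (['s','i','g','h','>'] ++ pvR3 (pvR2 (pvR1 r))) from rfl] at hp
            have h1 := (List.cons_prefix_cons.mp hp).1
            subst h1
            exact absurd List.mem_cons_self hlt
        · by_cases g3 : ('[' :: pvOs3) <+: (c :: t)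
          · obtain ⟨r, hr⟩ := g3
            have hrlen : r.length ≤ n := by
              have hl := congrArg List.length hr
              simp [pvOs3] at hl
              omega
            rw [← hr, pvR1_blockT3, pvR2_blockT3, pvR3_yes] at hp
            rw [← hr, pvR3_yes]
            exact ih r p hrlen hlt hlb hp
          · -- no tag among the first three starts here
            rw [pvR1_cons g1] at hp
            have e2 : ¬ ('[' :: pvOs2) <+: (c :: pvR1 t) := by
              intro hcon
              obtain ⟨hc, hcon2⟩ := List.cons_prefix_cons.mp hcon
              exact g2 (List.cons_prefix_cons.mpr ⟨hc, pvNC1 (by decide) hcon2⟩)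
            rw [pvR2_cons e2] at hp
            have e3 : ¬ ('[' :: pvOs3) <+: (c :: pvR2 (pvR1 t)) := by
              intro hcon
              obtain ⟨hc, hcon2⟩ := List.cons_prefix_cons.mp hcon
              exact g3 (List.cons_prefix_cons.mpr
                ⟨hc, pvNC1 (by decide) (pvNC2 (by decide) hcon2)⟩)
            rw [pvR3_cons e3] at hp
            rw [pvR3_cons g3]
            cases p with
            | nil => exact List.nil_prefix
            | cons ph pt =>
              obtain ⟨hc, hpt⟩ := List.cons_prefix_cons.mp hp
              have hrec := ih t pt hu' (fun hm => hlt (List.mem_cons_of_mem _ hm))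
                (fun hm => hlb (List.mem_cons_of_mem _ hm)) hpt
              exact List.cons_prefix_cons.mpr ⟨hc, hrec⟩

-- bridge: PySem's fuel-based replace equals pvRep for a nonempty pattern
theorem pvGo_spec (o : Char) (os nw : List Char) :
    ∀ fuel l acc, l.length ≤ fuel →
      PySem.Chars.replace.go (o :: os) nw fuel l acc = acc.reverse ++ pvRep o os nw l := by
  intro fuel
  induction fuel with
  | zero =>
    intro l acc hl
    have hl0 : l = [] := List.eq_nil_of_length_eq_zero (Nat.le_zero.mp hl)
    subst hl0
    rw [PySem.Chars.replace.go.eq_def]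
    simp [pvRep_nil]
  | succ fuel ih =>
    intro l acc hl
    cases l with
    | nil =>
      rw [PySem.Chars.replace.go.eq_def]
      simp [pvRep_nil]
    | cons c t =>
      rw [PySem.Chars.replace.go.eq_def]
      by_cases hp : (o :: os) <+: (c :: t)
      · simp only [pvIsPrefixOf_true hp, if_true]
        have hd : List.drop (o :: os).length (c :: t) = t.drop os.length := by
          simp [List.length_cons]
        have hlen : (t.drop os.length).length ≤ fuel := by
          simp only [List.length_drop]
          have : t.length + 1 ≤ fuel + 1 := by simpa using hl
          omega
        rw [hd, ih _ _ hlen, pvRep_cons_pos _ _ _ _ _ hp]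
        simp
      · simp only [pvIsPrefixOf_false hp]
        have hlen : t.length ≤ fuel := by
          have : t.length + 1 ≤ fuel + 1 := by simpa using hl
          omega
        rw [ih _ _ hlen, pvRep_cons_neg _ _ _ _ _ hp]
        simp

theorem pvReplace_eq (o : Char) (os nw l : List Char) :
    PySem.Chars.replace l (o :: os) nw = pvRep o os nw l := by
  rw [PySem.Chars.replace]
  simp only [List.isEmpty_cons, if_false, Bool.false_eq_true]
  rw [pvGo_spec o os nw l.length l [] (le_refl _)]
  simp

-- pvScanB case equations in block form
theorem pvScanB_t1 (r : List Char) :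
    pvScanB (('[' :: pvOs1) ++ r) = pvN1 ++ pvScanB r := by
  rw [show ('[' :: pvOs1) ++ r = '[' :: (pvOs1 ++ r) from rfl, pvScanB]
  have c1 : ("[laugh]".toList).isPrefixOf ('[' :: (pvOs1 ++ r)) = true := by
    apply pvIsPrefixOf_true
    rw [show "[laugh]".toList = '[' :: pvOs1 from by decide]
    exact ⟨r, by simp⟩
  simp only [c1, if_true]
  rw [show (pvOs1 ++ r).drop 6 = r from by
        rw [show (6 : Nat) = pvOs1.length from rfl, List.drop_left]]
  rw [show "<laughter>".toList = pvN1 from by decide]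

theorem pvScanB_t2 (r : List Char) :
    pvScanB (('[' :: pvOs2) ++ r) = pvN2 ++ pvScanB r := by
  rw [show ('[' :: pvOs2) ++ r = '[' :: (pvOs2 ++ r) from rfl, pvScanB]
  have c1 : ¬ ("[laugh]".toList).isPrefixOf ('[' :: (pvOs2 ++ r)) = true := by
    apply pvIsPrefixOf_false
    exact pvNotPrefix (p := "[laugh]".toList) (a := '[' :: pvOs2) r (by decide)
  have c2 : ("[sigh]".toList).isPrefixOf ('[' :: (pvOs2 ++ r)) = true := by
    apply pvIsPrefixOf_true
    rw [show "[sigh]".toList = '[' :: pvOs2 from by decide]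
    exact ⟨r, by simp⟩
  simp only [c1, c2, if_true, Bool.false_eq_true, if_false]
  rw [show (pvOs2 ++ r).drop 5 = r from by
        rw [show (5 : Nat) = pvOs2.length from rfl, List.drop_left]]
  rw [show "<sigh>".toList = pvN2 from by decide]

theorem pvScanB_t3 (r : List Char) :
    pvScanB (('[' :: pvOs3) ++ r) = pvScanB r := by
  rw [show ('[' :: pvOs3) ++ r = '[' :: (pvOs3 ++ r) from rfl, pvScanB]
  have c1 : ¬ ("[laugh]".toList).isPrefixOf ('[' :: (pvOs3 ++ r)) = true := by
    apply pvIsPrefixOf_false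
    exact pvNotPrefix (p := "[laugh]".toList) (a := '[' :: pvOs3) r (by decide)
  have c2 : ¬ ("[sigh]".toList).isPrefixOf ('[' :: (pvOs3 ++ r)) = true := by
    apply pvIsPrefixOf_false
    exact pvNotPrefix (p := "[sigh]".toList) (a := '[' :: pvOs3) r (by decide)
  have c3 : ("[smile]".toList).isPrefixOf ('[' :: (pvOs3 ++ r)) = true := by
    apply pvIsPrefixOf_true
    rw [show "[smile]".toList = '[' :: pvOs3 from by decide]
    exact ⟨r, by simp⟩
  simp only [c1, c2, c3, if_true, Bool.false_eq_true, if_false]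
  rw [show (pvOs3 ++ r).drop 6 = r from by
        rw [show (6 : Nat) = pvOs3.length from rfl, List.drop_left]]

theorem pvScanB_t4 (r : List Char) :
    pvScanB (('[' :: pvOs4) ++ r) = pvN4 ++ pvScanB r := by
  rw [show ('[' :: pvOs4) ++ r = '[' :: (pvOs4 ++ r) from rfl, pvScanB]
  have c1 : ¬ ("[laugh]".toList).isPrefixOf ('[' :: (pvOs4 ++ r)) = true := by
    apply pvIsPrefixOf_false
    exact pvNotPrefix (p := "[laugh]".toList) (a := '[' :: pvOs4) r (by decide)
  have c2 : ¬ ("[sigh]".toList).isPrefixOf ('[' :: (pvOs4 ++ r)) = true := by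
    apply pvIsPrefixOf_false
    exact pvNotPrefix (p := "[sigh]".toList) (a := '[' :: pvOs4) r (by decide)
  have c3 : ¬ ("[smile]".toList).isPrefixOf ('[' :: (pvOs4 ++ r)) = true := by
    apply pvIsPrefixOf_false
    exact pvNotPrefix (p := "[smile]".toList) (a := '[' :: pvOs4) r (by decide)
  have c4 : ("[pause]".toList).isPrefixOf ('[' :: (pvOs4 ++ r)) = true := by
    apply pvIsPrefixOf_true
    rw [show "[pause]".toList = '[' :: pvOs4 from by decide]
    exact ⟨r, by simp⟩
  simp only [c1, c2, c3, c4, if_true, Bool.false_eq_true, if_false]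
  rw [show (pvOs4 ++ r).drop 6 = r from by
        rw [show (6 : Nat) = pvOs4.length from rfl, List.drop_left]]
  rw [show "...".toList = pvN4 from by decide]

theorem pvScanB_no (c : Char) (t : List Char)
    (h1 : ¬ ('[' :: pvOs1) <+: (c :: t)) (h2 : ¬ ('[' :: pvOs2) <+: (c :: t))
    (h3 : ¬ ('[' :: pvOs3) <+: (c :: t)) (h4 : ¬ ('[' :: pvOs4) <+: (c :: t)) :
    pvScanB (c :: t) = c :: pvScanB t := by
  rw [pvScanB]
  have c1 : ¬ ("[laugh]".toList).isPrefixOf (c :: t) = true := by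
    apply pvIsPrefixOf_false
    rw [show "[laugh]".toList = '[' :: pvOs1 from by decide]; exact h1
  have c2 : ¬ ("[sigh]".toList).isPrefixOf (c :: t) = true := by
    apply pvIsPrefixOf_false
    rw [show "[sigh]".toList = '[' :: pvOs2 from by decide]; exact h2
  have c3 : ¬ ("[smile]".toList).isPrefixOf (c :: t) = true := by
    apply pvIsPrefixOf_false
    rw [show "[smile]".toList = '[' :: pvOs3 from by decide]; exact h3
  have c4 : ¬ ("[pause]".toList).isPrefixOf (c :: t) = true := by
    apply pvIsPrefixOf_false
    rw [show "[pause]".toList = '[' :: pvOs4 from by decide]; exact h4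
  simp only [c1, c2, c3, c4, Bool.false_eq_true, if_false]

-- the precondition at the character-list level
def pvPreL (l : List Char) : Prop :=
  ∀ s ∈ l.tails, ('[' :: pvOs4) <+: pvR3 s → (('[' :: pvOs4) <+: s ∨ ('[' :: pvOs3) <+: s)

theorem pvPre_iff (text : String) :
    Pre_process_action_tags_py text ↔ pvPreL text.toList := by
  unfold Pre_process_action_tags_py pvPreL pvR3
  simp only [show "[pause]".toList = '[' :: pvOs4 from by decide,
             show "[smile]".toList = '[' :: pvOs3 from by decide, pvReplace_eq]

theorem pvPreL_suffix {l s : List Char} (h : pvPreL l) (hs : s <:+ l) : pvPreL s := by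
  intro x hx
  exact h x ((List.mem_tails _ _).mpr (((List.mem_tails _ _).mp hx).trans hs))

-- main induction: A's pipeline equals B's single scan under the precondition
theorem pvMain : ∀ n l, l.length ≤ n → pvPreL l →
    pvR4 (pvR3 (pvR2 (pvR1 l))) = pvScanB l := by
  intro n
  induction n with
  | zero =>
    intro l hl _
    have hl0 : l = [] := List.eq_nil_of_length_eq_zero (Nat.le_zero.mp hl)
    subst hl0
    simp only [pvR1, pvR2, pvR3, pvR4, pvRep_nil, pvScanB]
  | succ n ih =>
    intro l hl hpre
    cases l with
    | nil => simp only [pvR1, pvR2, pvR3, pvR4, pvRep_nil, pvScanB]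
    | cons c t =>
      have ht : t.length ≤ n := by
        have : t.length + 1 ≤ n + 1 := by simpa using hl
        omega
      by_cases g1 : ('[' :: pvOs1) <+: (c :: t)
      · obtain ⟨r, hr⟩ := g1
        have hrlen : r.length ≤ n := by
          have hlr := congrArg List.length hr
          simp [pvOs1] at hlr
          omega
        have hprer : pvPreL r := pvPreL_suffix hpre ⟨'[' :: pvOs1, hr⟩
        rw [← hr, pvR1_yes, pvR2_passN1, pvR3_passN1, pvR4_passN1, pvScanB_t1,
            ih r hrlen hprer]
      · by_cases g2 : ('[' :: pvOs2) <+: (c :: t)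
        · obtain ⟨r, hr⟩ := g2
          have hrlen : r.length ≤ n := by
            have hlr := congrArg List.length hr
            simp [pvOs2] at hlr
            omega
          have hprer : pvPreL r := pvPreL_suffix hpre ⟨'[' :: pvOs2, hr⟩
          rw [← hr, pvR1_blockT2, pvR2_yes, pvR3_passN2, pvR4_passN2, pvScanB_t2,
              ih r hrlen hprer]
        · by_cases g3 : ('[' :: pvOs3) <+: (c :: t)
          · obtain ⟨r, hr⟩ := g3
            have hrlen : r.length ≤ n := by
              have hlr := congrArg List.length hr
              simp [pvOs3] at hlr
              omega
            have hprer : pvPreL r := pvPreL_suffix hpre ⟨'[' :: pvOs3, hr⟩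
            rw [← hr, pvR1_blockT3, pvR2_blockT3, pvR3_yes, pvScanB_t3,
                ih r hrlen hprer]
          · by_cases g4 : ('[' :: pvOs4) <+: (c :: t)
            · obtain ⟨r, hr⟩ := g4
              have hrlen : r.length ≤ n := by
                have hlr := congrArg List.length hr
                simp [pvOs4] at hlr
                omega
              have hprer : pvPreL r := pvPreL_suffix hpre ⟨'[' :: pvOs4, hr⟩
              rw [← hr, pvR1_blockT4, pvR2_blockT4, pvR3_blockT4, pvR4_yes, pvScanB_t4,
                  ih r hrlen hprer]
            · -- no tag starts at this position
              have e2 : ¬ ('[' :: pvOs2) <+: (c :: pvR1 t) := by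
                intro hcon
                obtain ⟨hc, hcon2⟩ := List.cons_prefix_cons.mp hcon
                exact g2 (List.cons_prefix_cons.mpr ⟨hc, pvNC1 (by decide) hcon2⟩)
              have e3 : ¬ ('[' :: pvOs3) <+: (c :: pvR2 (pvR1 t)) := by
                intro hcon
                obtain ⟨hc, hcon2⟩ := List.cons_prefix_cons.mp hcon
                exact g3 (List.cons_prefix_cons.mpr
                  ⟨hc, pvNC1 (by decide) (pvNC2 (by decide) hcon2)⟩)
              have e4 : ¬ ('[' :: pvOs4) <+: (c :: pvR3 (pvR2 (pvR1 t))) := by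
                intro hcon
                obtain ⟨hc, hcon2⟩ := List.cons_prefix_cons.mp hcon
                have hkey := pvKey t.length t pvOs4 (le_refl _) (by decide) (by decide) hcon2
                have hpau : ('[' :: pvOs4) <+: pvR3 (c :: t) := by
                  rw [pvR3_cons g3]
                  exact List.cons_prefix_cons.mpr ⟨hc, hkey⟩
                rcases hpre (c :: t) ((List.mem_tails _ _).mpr (List.suffix_refl _)) hpau with
                  h | h
                · exact g4 h
                · exact g3 h
              have hpret : pvPreL t := pvPreL_suffix hpre ⟨[c], rfl⟩
              rw [pvR1_cons g1, pvR2_cons e2, pvR3_cons e3, pvR4_cons e4,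
                  pvScanB_no c t g1 g2 g3 g4, ih t ht hpret]

-- ===== VERDICT (by name: the statement is the Claim_ definition above) =====
theorem process_action_tags_py_spec : Claim_equal_process_action_tags_py := by
  intro text _ hpre
  unfold Spec_process_action_tags_py process_action_tags_py process_action_tags_py_alt pvActionMapping
  simp only [List.foldl_cons, List.foldl_nil]
  simp only [PySem.Str.replace, String.toList_ofList]
  simp only [show "[laugh]".toList = '[' :: pvOs1 from by decide,
             show "<laughter>".toList = pvN1 from by decide,
             show "[sigh]".toList = '[' :: pvOs2 from by decide,
             show "<sigh>".toList = pvN2 from by decide,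
             show "[smile]".toList = '[' :: pvOs3 from by decide,
             show ("".toList : List Char) = [] from rfl,
             show "...".toList = pvN4 from by decide,
             show "[pause]".toList = '[' :: pvOs4 from by decide,
             pvReplace_eq]
  have hm := pvMain text.toList.length text.toList (le_refl _) ((pvPre_iff text).mp hpre)
  simp only [pvR1, pvR2, pvR3, pvR4] at hm
  rw [hm]
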